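-- pv_equiv track=rewrite | github.com/open-cu/code-cheating | course/1/subject_python/I/40501-39170.py | truly_even_numbers
-- ===== SOURCE A (Python) =====
-- def truly_even_numbers(number: int) -> int:
--     counter = 0
--     for i in range(1, number + 1):
--         digits = str(i)
--         flag = True
--         for digit in digits:
--             if int(digit) % 2 != 0:
--                 flag = False
--                 break
--         if flag:
--             counter += 1
--     return counter
-- ===== SOURCE B (Python) =====
-- def truly_even_numbers(number: int) -> int:
--     # The m-th positive number whose decimal digits are all even is obtained by
--     # writing m in quinary and doubling each digit (read as a decimal numeral); binary-search
--     # for the largest m whose image is <= number.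
--     if number < 1:
--         return 0
--
--     def f(m):
--         r, p = 0, 1
--         while m:
--             r += 2 * (m % 5) * p
--             m //= 5
--             p *= 10
--         return r
--
--     lo, hi = 0, number + 1
--     while hi - lo > 1:
--         mid = (lo + hi) // 2
--         if f(mid) <= number:
--             lo = mid
--         else:
--             hi = mid
--     return lo
-- ===== Notes on version B (the rewrite author's own statement) =====
-- stated objective: faster
-- what changed: Replaced the scan of all i in 1..n (converting each to a string and checking its digits) by a binary search for the largest m whose quinary digits, doubled and read as a decimal numeral, give an all-even-digit value at most n, using that this map is an order-preserving bijection onto the all-even-digit numbers.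
import Mathlib
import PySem

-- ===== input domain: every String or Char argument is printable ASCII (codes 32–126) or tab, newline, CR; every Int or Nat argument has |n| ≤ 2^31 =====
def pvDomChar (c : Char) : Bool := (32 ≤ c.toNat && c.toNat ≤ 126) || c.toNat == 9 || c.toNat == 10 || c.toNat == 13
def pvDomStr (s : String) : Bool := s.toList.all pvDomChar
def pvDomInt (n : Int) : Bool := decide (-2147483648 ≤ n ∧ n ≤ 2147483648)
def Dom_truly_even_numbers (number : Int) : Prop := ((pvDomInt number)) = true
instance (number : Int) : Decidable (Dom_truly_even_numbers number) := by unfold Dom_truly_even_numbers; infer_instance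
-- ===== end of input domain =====

-- B replaces A's scan over all of 1..n by a binary search through the order-preserving
-- bijection m ↦ (quinary digits of m, doubled, read as a decimal numeral) onto the all-even-digit
-- numbers (objective: faster).

-- ===== PORT A =====
-- inner loop 'for digit in digits: if int(digit) % 2 != 0: flag = False; break'
-- (the 'none' branch is where int(digit) would raise ValueError; for the digit characters
--  of str(i), i ≥ 1, it is never taken)
def pvFlagLoop : List Char → Bool
  | [] => true
  | c :: rest =>
    match PySem.Int.ofChars? [c] with
    | some d => if PySem.Int.mod d 2 ≠ 0 then false else pvFlagLoop rest
    | none => false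

def truly_even_numbers (number : Int) : Int :=
  (PySem.List.pyRange 1 (number + 1) 1).foldl
    (fun counter i =>
      let digits := PySem.Int.toStr i
      if pvFlagLoop digits.toList then counter + 1 else counter) 0

-- ===== PORT B =====
-- 'while m: r += 2*(m%5)*p; m //= 5; p *= 10' — every value stays nonnegative, so Nat's
-- / and % coincide with Python's // and % here; the extra fuel argument (m //= 5 strictly
-- shrinks m, so fuel = initial m suffices) only makes the recursion structural
def pvFLoop (fuel m r p : Nat) : Nat :=
  match fuel with
  | 0 => r
  | fuel + 1 => if m = 0 then r else pvFLoop fuel (m / 5) (r + 2 * (m % 5) * p) (p * 10)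

def pvF (m : Nat) : Nat := pvFLoop m m 0 1

-- 'while hi - lo > 1: mid = (lo+hi)//2; …'  (mid is inlined — it is used twice, unchanged;
-- hi - lo strictly shrinks, so fuel = initial hi - lo makes the recursion structural)
def pvBSLoop (number : Int) (fuel lo hi : Nat) : Nat :=
  match fuel with
  | 0 => lo
  | fuel + 1 =>
    if hi - lo > 1 then
      if (pvF ((lo + hi) / 2) : Int) ≤ number then pvBSLoop number fuel ((lo + hi) / 2) hi
      else pvBSLoop number fuel lo ((lo + hi) / 2)
    else lo

def truly_even_numbers_alt (number : Int) : Int :=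
  if number < 1 then 0
  else (pvBSLoop number (number.toNat + 1) 0 (number.toNat + 1) : Int)

-- ===== PRECONDITION & SPEC =====
def Spec_truly_even_numbers (number : Int) (out : Int) : Prop := out = truly_even_numbers_alt number
instance (number : Int) (out : Int) : Decidable (Spec_truly_even_numbers number out) := by unfold Spec_truly_even_numbers; infer_instance

-- ===== CLAIM (what is proved, stated in full; the proofs are below) =====
def Claim_equal_truly_even_numbers : Prop := ∀ (number : Int), Dom_truly_even_numbers number → Spec_truly_even_numbers number (truly_even_numbers number)

-- ===== LEMMAS AND PROOFS =====

-- A's loop body, named so the loop can be peeled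
def pvStep : Int → Int → Int := fun counter i =>
  let digits := PySem.Int.toStr i
  if pvFlagLoop digits.toList then counter + 1 else counter

lemma pvA_def (n : Int) :
    truly_even_numbers n = (PySem.List.pyRange 1 (n + 1) 1).foldl pvStep 0 := rfl

-- closed recursive form of B's f
def pvG (m : Nat) : Nat :=
  if hm : m = 0 then 0 else 2 * (m % 5) + 10 * pvG (m / 5)
termination_by m
decreasing_by exact Nat.div_lt_self (Nat.pos_of_ne_zero hm) (by omega)

-- 'all decimal digits even'
def pvE (k : Nat) : Bool := (Nat.digits 10 k).all (fun d => d % 2 = 0)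

-- count of all-even numbers in 1..N
def pvC : Nat → Nat
  | 0 => 0
  | N + 1 => pvC N + if pvE (N + 1) then 1 else 0

-- inverse of pvG on all-even numbers
def pvGinv (k : Nat) : Nat :=
  if hk : k = 0 then 0 else (k % 10) / 2 + 5 * pvGinv (k / 10)
termination_by k
decreasing_by exact Nat.div_lt_self (Nat.pos_of_ne_zero hk) (by omega)

lemma pvFLoop_eq : ∀ fuel m r p, m ≤ fuel → pvFLoop fuel m r p = r + p * pvG m := by
  intro fuel
  induction fuel with
  | zero =>
    intro m r p hm
    have h0 : m = 0 := by omega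
    subst h0
    have : pvG 0 = 0 := by rw [pvG]; simp
    simp [pvFLoop, this]
  | succ f ihf =>
    intro m r p hm
    simp only [pvFLoop]
    by_cases h0 : m = 0
    · have : pvG 0 = 0 := by rw [pvG]; simp
      simp [h0, this]
    · rw [if_neg h0, pvG, dif_neg h0,
          ihf (m / 5) _ _ (by
            have := Nat.div_lt_self (Nat.pos_of_ne_zero h0) (by omega : 1 < 5)
            omega)]
      ring

lemma pvF_eq (m : Nat) : pvF m = pvG m := by
  rw [pvF, pvFLoop_eq m m 0 1 (Nat.le_refl m)]
  ring

lemma pvG_ge (m : Nat) : m ≤ pvG m := by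
  induction m using Nat.strong_induction_on with
  | _ m ih =>
    rw [pvG]
    by_cases hm : m = 0
    · simp [hm]
    · rw [dif_neg hm]
      have h1 := ih (m / 5) (Nat.div_lt_self (Nat.pos_of_ne_zero hm) (by omega))
      omega

lemma pvG_strictMono' : ∀ b a : Nat, a < b → pvG a < pvG b := by
  intro b
  induction b using Nat.strong_induction_on with
  | _ b ih =>
    intro a h
    have hb : b ≠ 0 := by omega
    by_cases ha : a = 0
    · subst ha
      have h0 : pvG 0 = 0 := by rw [pvG]; simp
      have := pvG_ge b
      omega
    · have hA : pvG a = 2 * (a % 5) + 10 * pvG (a / 5) := by rw [pvG, dif_neg ha]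
      have hB : pvG b = 2 * (b % 5) + 10 * pvG (b / 5) := by rw [pvG, dif_neg hb]
      by_cases hq : a / 5 = b / 5
      · have : a % 5 < b % 5 := by omega
        rw [hA, hB, hq]
        omega
      · have hqlt : a / 5 < b / 5 := by omega
        have hb5 : b / 5 < b := Nat.div_lt_self (Nat.pos_of_ne_zero hb) (by omega)
        have hrec := ih (b / 5) hb5 (a / 5) hqlt
        have h1 : a % 5 < 5 := Nat.mod_lt _ (by omega)
        omega

lemma pvG_strictMono {a b : Nat} (h : a < b) : pvG a < pvG b := pvG_strictMono' b a h

lemma pvG_mono {a b : Nat} (h : a ≤ b) : pvG a ≤ pvG b := by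
  rcases Nat.lt_or_ge a b with h' | h'
  · exact Nat.le_of_lt (pvG_strictMono h')
  · have : a = b := by omega
    subst this; exact Nat.le_refl _

lemma pvG_reflect {a b : Nat} (h : pvG a < pvG b) : a < b := by
  by_contra hab
  exact absurd (pvG_mono (by omega : b ≤ a)) (by omega)

lemma pvE_pvG (m : Nat) : pvE (pvG m) = true := by
  induction m using Nat.strong_induction_on with
  | _ m ih =>
    by_cases hm : m = 0
    · subst hm
      have h0 : pvG 0 = 0 := by rw [pvG]; simp
      simp [h0, pvE]
    · have hge := pvG_ge m
      have hpos : 0 < pvG m := by omega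
      have hrec : pvG m = 2 * (m % 5) + 10 * pvG (m / 5) := by rw [pvG, dif_neg hm]
      have h5 : m % 5 < 5 := Nat.mod_lt _ (by omega)
      have hmod : pvG m % 10 = 2 * (m % 5) := by omega
      have hdiv : pvG m / 10 = pvG (m / 5) := by omega
      have hih := ih (m / 5) (Nat.div_lt_self (Nat.pos_of_ne_zero hm) (by omega))
      rw [pvE] at hih ⊢
      rw [Nat.digits_def' (by norm_num : 1 < 10) hpos, List.all_cons, hmod, hdiv, hih]
      simp [Nat.mul_mod_right]

lemma pvG_pvGinv : ∀ k : Nat, pvE k = true → pvG (pvGinv k) = k := by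
  intro k
  induction k using Nat.strong_induction_on with
  | _ k ih =>
    intro hk
    by_cases h0 : k = 0
    · subst h0
      rw [pvGinv]; simp
      rw [pvG]; simp
    · have hkpos : 0 < k := Nat.pos_of_ne_zero h0
      rw [pvE, Nat.digits_def' (by norm_num : 1 < 10) hkpos, List.all_cons] at hk
      have hk' := (Bool.and_eq_true _ _).mp hk
      have hd : k % 10 % 2 = 0 := by simpa using hk'.1
      have ht : pvE (k / 10) = true := by rw [pvE]; exact hk'.2
      have hih : pvG (pvGinv (k / 10)) = k / 10 :=
        ih (k / 10) (Nat.div_lt_self hkpos (by omega)) ht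
      rw [pvGinv, dif_neg h0]
      set a := k % 10 / 2 with ha
      set q := pvGinv (k / 10) with hq
      have ha5 : a < 5 := by omega
      by_cases hz : a + 5 * q = 0
      · have hqz : q = 0 := by omega
        have hq0 : pvG 0 = 0 := by rw [pvG]; simp
        have : k / 10 = 0 := by rw [← hih, hqz, hq0]
        omega
      · rw [pvG, dif_neg hz]
        have hmod5 : (a + 5 * q) % 5 = a := by omega
        have hdiv5 : (a + 5 * q) / 5 = q := by omega
        rw [hmod5, hdiv5, hih]
        omega

lemma pvC_bracket (N : Nat) : pvG (pvC N) ≤ N ∧ N < pvG (pvC N + 1) := by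
  induction N with
  | zero =>
    have h0 : pvG 0 = 0 := by rw [pvG]; simp
    have h1 : (0:Nat) < pvG 1 := by
      have := pvG_strictMono (by omega : (0:Nat) < 1)
      omega
    exact ⟨by simp [pvC, h0], by simpa [pvC] using h1⟩
  | succ N ihN =>
    obtain ⟨ih1, ih2⟩ := ihN
    by_cases hE : pvE (N + 1) = true
    · have hsurj : pvG (pvGinv (N + 1)) = N + 1 := pvG_pvGinv (N + 1) hE
      set m := pvGinv (N + 1) with hm
      have hmlt : pvC N < m := pvG_reflect (by omega)
      have hle : pvG (pvC N + 1) ≤ pvG m := pvG_mono (by omega)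
      have hC : pvC (N + 1) = pvC N + 1 := by simp [pvC, hE]
      refine ⟨by rw [hC]; omega, ?_⟩
      rw [hC]
      have := pvG_strictMono (by omega : pvC N + 1 < pvC N + 1 + 1)
      omega
    · have hC : pvC (N + 1) = pvC N := by simp [pvC, hE]
      refine ⟨by rw [hC]; omega, ?_⟩
      rw [hC]
      have hne : pvG (pvC N + 1) ≠ N + 1 := by
        intro hcontra
        exact hE (hcontra ▸ pvE_pvG (pvC N + 1))
      omega

lemma pvC_unique {N r : Nat} (h1 : pvG r ≤ N) (h2 : N < pvG (r + 1)) : r = pvC N := by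
  obtain ⟨hc1, hc2⟩ := pvC_bracket N
  by_contra hne
  rcases Nat.lt_or_ge r (pvC N) with h | h
  · have := pvG_mono (by omega : r + 1 ≤ pvC N)
    omega
  · have := pvG_mono (by omega : pvC N + 1 ≤ r)
    omega

lemma pvBS_spec : ∀ fuel (number : Int) (lo hi : Nat), hi - lo ≤ fuel → lo < hi →
    (pvG lo : Int) ≤ number → number < (pvG hi : Int) →
    (pvG (pvBSLoop number fuel lo hi) : Int) ≤ number ∧
      number < (pvG (pvBSLoop number fuel lo hi + 1) : Int) := by
  intro fuel
  induction fuel with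
  | zero => intro number lo hi hd hlt h1 h2; omega
  | succ f ihf =>
    intro number lo hi hd hlt h1 h2
    simp only [pvBSLoop]
    by_cases h : hi - lo > 1
    · rw [if_pos h]
      by_cases hf : (pvF ((lo + hi) / 2) : Int) ≤ number
      · rw [if_pos hf]
        rw [pvF_eq] at hf
        exact ihf number _ _ (by omega) (by omega) hf h2
      · rw [if_neg hf]
        rw [pvF_eq] at hf
        exact ihf number _ _ (by omega) (by omega) h1 (by omega)
    · rw [if_neg h]
      have : hi = lo + 1 := by omega
      subst this
      exact ⟨h1, h2⟩

-- int(c) on a single decimal digit character recovers the digit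
lemma pvOfChars_digitChar (d : Nat) (hd : d < 10) :
    PySem.Int.ofChars? [Nat.digitChar d] = some (d : Int) := by
  interval_cases d <;> decide

lemma pvFlagLoop_map (l : List Nat) (hl : ∀ d ∈ l, d < 10) :
    pvFlagLoop (l.map Nat.digitChar) = l.all (fun d => d % 2 = 0) := by
  induction l with
  | nil => rfl
  | cons d rest ih =>
    have hd : d < 10 := hl d List.mem_cons_self
    simp only [List.map_cons, pvFlagLoop, pvOfChars_digitChar d hd]
    have hmod : PySem.Int.mod (d : Int) 2 = ((d % 2 : Nat) : Int) := by
      exact_mod_cast PySem.Int.mod_natCast d 2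
    rw [hmod, List.all_cons]
    by_cases he : d % 2 = 0
    · rw [ih (fun x hx => hl x (List.mem_cons_of_mem _ hx))]
      simp [he]
    · have h1 : d % 2 = 1 := by omega
      simp [h1]

-- Nat.toDigitsCore produces the decimal digit characters, most significant first
lemma pvToDigitsCore_eq : ∀ fuel n ds, 0 < n → n < fuel →
    Nat.toDigitsCore 10 fuel n ds = ((Nat.digits 10 n).map Nat.digitChar).reverse ++ ds := by
  intro fuel
  induction fuel with
  | zero => intro n ds h1 h2; omega
  | succ f ihf =>
    intro n ds h1 h2
    rw [Nat.toDigitsCore]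
    by_cases hq : n / 10 = 0
    · rw [if_pos hq]
      rw [Nat.digits_def' (by norm_num : 1 < 10) h1, hq]
      have : n % 10 = n := by omega
      simp [this]
    · rw [if_neg hq]
      have hqpos : 0 < n / 10 := Nat.pos_of_ne_zero hq
      have hqlt : n / 10 < f := by
        have : n / 10 < n := Nat.div_lt_self h1 (by omega)
        omega
      rw [ihf (n / 10) _ hqpos hqlt, Nat.digits_def' (by norm_num : 1 < 10) h1]
      simp

lemma pvFlag_eq_pvE (k : Nat) (hk : 0 < k) :
    pvFlagLoop (PySem.Int.toStr (k : Int)).toList = pvE k := by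
  rw [PySem.Int.toList_toStr]
  have hchars : PySem.Int.toChars (k : Int) = Nat.toDigits 10 k := by
    simp only [PySem.Int.toChars]
    rw [if_neg (by omega : ¬ ((k : Int) < 0))]
    simp
  rw [hchars, Nat.toDigits, pvToDigitsCore_eq (k + 1) k [] hk (by omega)]
  rw [List.append_nil, ← List.map_reverse]
  rw [pvFlagLoop_map _ (fun d hd => Nat.digits_lt_base (by norm_num) (List.mem_reverse.mp hd))]
  rw [pvE, List.all_reverse]

lemma pvA_eq_pvC (N : Nat) : truly_even_numbers (N : Int) = (pvC N : Int) := by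
  induction N with
  | zero =>
    have h1 : ((0 : Nat) : Int) + 1 = 1 := by norm_num
    rw [pvA_def, h1, PySem.List.pyRange_one_eq_nil (le_refl 1)]
    simp [pvC]
  | succ N ihN =>
    rw [pvA_def] at ihN ⊢
    have hstep : ((N + 1 : Nat) : Int) + 1 = ((N : Int) + 1) + 1 := by push_cast; ring
    rw [hstep, PySem.List.pyRange_one_succ_right (by omega : (1 : Int) ≤ (N : Int) + 1),
        List.foldl_append]
    simp only [List.foldl_cons, List.foldl_nil]
    rw [ihN]
    have hc : ((N : Int) + 1) = ((N + 1 : Nat) : Int) := by push_cast; ring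
    rw [hc]
    simp only [pvStep]
    rw [pvFlag_eq_pvE (N + 1) (by omega)]
    by_cases hE : pvE (N + 1) = true
    · simp only [hE, if_true]
      have : pvC (N + 1) = pvC N + 1 := by simp [pvC, hE]
      rw [this]; push_cast; ring
    · simp only [hE]
      have : pvC (N + 1) = pvC N := by simp [pvC, hE]
      rw [this]
      simp

lemma pvA_neg (number : Int) (h : number < 1) : truly_even_numbers number = 0 := by
  rw [pvA_def, PySem.List.pyRange_one_eq_nil (by omega)]
  rfl

-- ===== VERDICT (by name: the statement is the Claim_ definition above) =====
theorem truly_even_numbers_spec : Claim_equal_truly_even_numbers := by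
  intro number _
  unfold Spec_truly_even_numbers
  by_cases hneg : number < 1
  · rw [truly_even_numbers_alt, if_pos hneg, pvA_neg number hneg]
  · have hN : number = (number.toNat : Int) := by omega
    set N := number.toNat with hNdef
    have hNpos : 1 ≤ N := by omega
    rw [truly_even_numbers_alt, if_neg hneg]
    have hA : truly_even_numbers number = (pvC N : Int) := by
      rw [hN]; exact pvA_eq_pvC N
    rw [hA]
    have hg0 : pvG 0 = 0 := by rw [pvG]; simp
    have hbr := pvBS_spec (N + 1) number 0 (N + 1) (by omega) (by omega)
      (by rw [hg0]; push_cast; omega)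
      (by
        have hge := pvG_ge (N + 1)
        have hge' : ((N + 1 : Nat) : Int) ≤ (pvG (N + 1) : Int) := by exact_mod_cast hge
        omega)
    obtain ⟨hb1, hb2⟩ := hbr
    have hb1' : pvG (pvBSLoop number (N + 1) 0 (N + 1)) ≤ N := by
      have h' : (pvG (pvBSLoop number (N + 1) 0 (N + 1)) : Int) ≤ (N : Int) := by
        rw [← hN]; exact hb1
      exact_mod_cast h'
    have hb2' : N < pvG (pvBSLoop number (N + 1) 0 (N + 1) + 1) := by
      have h' : (N : Int) < (pvG (pvBSLoop number (N + 1) 0 (N + 1) + 1) : Int) := by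
        rw [← hN]; exact hb2
      exact_mod_cast h'
    exact congrArg _ (pvC_unique hb1' hb2').symm
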